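-- pv_equiv track=rewrite | github.com/mkite-group/mkwind | mkwind/schedulers/sge.py | _split_into_blocks
-- ===== SOURCE A (Python) =====
-- def _split_into_blocks(text):
--     """Splits the text into blocks separated by lines of '='."""
--     lines = text.strip().split("\n")
--     blocks = []
--     current_block = []
--     for line in lines:
--         if line.strip().startswith("="):
--             if current_block:
--                 blocks.append("\n".join(current_block))
--                 current_block = []
--         else:
--             current_block.append(line)
--     if current_block:
--         blocks.append("\n".join(current_block))
--     return blocks
-- ===== SOURCE B (Python) =====
-- def _split_into_blocks(text):
--     """Splits the text into blocks separated by lines of '='."""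
--     lines = text.strip().split("\n")
--     blocks = []
--     i, n = 0, len(lines)
--     while i < n:
--         if lines[i].strip().startswith("="):
--             i += 1
--             continue
--         j = i
--         while j < n and not lines[j].strip().startswith("="):
--             j += 1
--         blocks.append("\n".join(lines[i:j]))
--         i = j
--     return blocks
-- ===== Notes on version B (the rewrite author's own statement) =====
-- stated objective: alternative
-- what changed: Replaces A's maintained current_block accumulator with flush-on-separator branches by a two-pointer scan that skips separator lines and slices out each maximal non-separator run as a block.
import Mathlib
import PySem

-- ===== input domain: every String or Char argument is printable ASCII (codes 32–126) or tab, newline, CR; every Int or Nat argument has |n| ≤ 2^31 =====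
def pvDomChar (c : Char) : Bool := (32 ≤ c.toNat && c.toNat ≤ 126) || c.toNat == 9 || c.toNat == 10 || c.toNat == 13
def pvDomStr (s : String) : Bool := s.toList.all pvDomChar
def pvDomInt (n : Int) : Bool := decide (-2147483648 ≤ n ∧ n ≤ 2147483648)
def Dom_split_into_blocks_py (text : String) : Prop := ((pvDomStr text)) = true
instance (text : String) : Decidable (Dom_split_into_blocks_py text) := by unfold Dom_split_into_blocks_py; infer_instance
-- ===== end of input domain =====

-- B replaces A's maintained current_block buffer and flush-on-separator branch by a
-- two-pointer scan that skips separator lines and slices out each maximal non-separator run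
-- (objective: alternative decomposition, same cost).

-- `line.strip().startswith("=")`
def pvIsSep (line : String) : Bool := PySem.Str.startswith (PySem.Str.strip line) "="

-- `text.strip().split("\n")` (sep "\n" ≠ "", so split? is always some)
def pvLines (text : String) : List String :=
  (PySem.Str.split? (PySem.Str.strip text) "\n").getD []

-- ===== PORT A =====
-- A's loop state: (blocks, current_block); final flush after the loop.
def split_into_blocks_py (text : String) : List String :=
  let st := (pvLines text).foldl
    (fun (st : List String × List String) line =>
      if pvIsSep line then
        if st.2.isEmpty then st else (st.1 ++ [PySem.Str.join "\n" st.2], [])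
      else (st.1, st.2 ++ [line]))
    ([], [])
  if st.2.isEmpty then st.1 else st.1 ++ [PySem.Str.join "\n" st.2]

-- ===== PORT B =====
-- B's scan: skip a separator line, otherwise take the maximal non-separator run as one block.
def pvAltGo (lines : List String) : List String :=
  match lines with
  | [] => []
  | l :: ls =>
    if pvIsSep l then pvAltGo ls
    else PySem.Str.join "\n" (l :: ls.takeWhile (fun y => !pvIsSep y))
           :: pvAltGo (ls.dropWhile (fun y => !pvIsSep y))
termination_by lines.length
decreasing_by
  · simp
  · exact Nat.lt_succ_of_le (List.length_dropWhile_le _ _)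

def split_into_blocks_py_alt (text : String) : List String :=
  pvAltGo (pvLines text)

-- ===== PRECONDITION & SPEC =====
def Spec_split_into_blocks_py (text : String) (out : List String) : Prop := out = split_into_blocks_py_alt text
instance (text : String) (out : List String) : Decidable (Spec_split_into_blocks_py text out) := by unfold Spec_split_into_blocks_py; infer_instance

-- ===== CLAIM (what is proved, stated in full; the proofs are below) =====
def Claim_equal_split_into_blocks_py : Prop := ∀ (text : String), Dom_split_into_blocks_py text → Spec_split_into_blocks_py text (split_into_blocks_py text)

-- ===== LEMMAS AND PROOFS =====

-- proof-only names for A's loop body and final flush (definitionally A's port)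
def pvStep (st : List String × List String) (line : String) : List String × List String :=
  if pvIsSep line then
    if st.2.isEmpty then st else (st.1 ++ [PySem.Str.join "\n" st.2], [])
  else (st.1, st.2 ++ [line])

def pvFinish (st : List String × List String) : List String :=
  if st.2.isEmpty then st.1 else st.1 ++ [PySem.Str.join "\n" st.2]

theorem pvA_eq (text : String) :
    split_into_blocks_py text = pvFinish ((pvLines text).foldl pvStep ([], [])) := rfl

theorem pvTakeWhile_append_all (cs lines : List String)
    (h : ∀ x ∈ cs, pvIsSep x = false) :
    (cs ++ lines).takeWhile (fun y => !pvIsSep y)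
      = cs ++ lines.takeWhile (fun y => !pvIsSep y) := by
  induction cs with
  | nil => simp
  | cons d ds ihd =>
    have hd : pvIsSep d = false := h d (List.mem_cons_self ..)
    simp only [List.cons_append, List.takeWhile_cons, hd]
    simp [ihd (fun x hx => h x (List.mem_cons_of_mem _ hx))]

theorem pvDropWhile_append_all (cs lines : List String)
    (h : ∀ x ∈ cs, pvIsSep x = false) :
    (cs ++ lines).dropWhile (fun y => !pvIsSep y)
      = lines.dropWhile (fun y => !pvIsSep y) := by
  induction cs with
  | nil => simp
  | cons d ds ihd =>
    have hd : pvIsSep d = false := h d (List.mem_cons_self ..)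
    simp only [List.cons_append, List.dropWhile_cons, hd]
    simp [ihd (fun x hx => h x (List.mem_cons_of_mem _ hx))]

-- pvAltGo on a nonempty all-non-separator prefix: the prefix merges into the first block.
theorem pvAltGo_append_nonsep (cur : List String) (lines : List String)
    (hne : cur ≠ []) (hns : ∀ x ∈ cur, pvIsSep x = false) :
    pvAltGo (cur ++ lines)
      = PySem.Str.join "\n" (cur ++ lines.takeWhile (fun y => !pvIsSep y))
          :: pvAltGo (lines.dropWhile (fun y => !pvIsSep y)) := by
  match cur with
  | [] => exact absurd rfl hne
  | c :: cs =>
    have hc : pvIsSep c = false := hns c (List.mem_cons_self ..)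
    have hns' : ∀ x ∈ cs, pvIsSep x = false := fun x hx => hns x (List.mem_cons_of_mem _ hx)
    rw [List.cons_append, pvAltGo, if_neg (by simp [hc]),
        pvTakeWhile_append_all cs lines hns', pvDropWhile_append_all cs lines hns']
    simp

-- main loop invariant: A's fold-and-flush equals B's run scan with the pending buffer prepended
theorem pvLoop_eq (lines : List String) : ∀ (blocks cur : List String),
    (∀ x ∈ cur, pvIsSep x = false) →
    pvFinish (lines.foldl pvStep (blocks, cur)) = blocks ++ pvAltGo (cur ++ lines) := by
  induction lines with
  | nil =>
    intro blocks cur hns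
    rcases eq_or_ne cur [] with h | h
    · subst h; simp [pvAltGo, pvFinish]
    · have hgo := pvAltGo_append_nonsep cur [] h hns
      simp only [List.append_nil, List.takeWhile_nil, List.dropWhile_nil] at hgo
      rw [List.foldl_nil, List.append_nil, hgo]
      simp [pvAltGo, pvFinish, h]
  | cons l ls ih =>
    intro blocks cur hns
    rw [List.foldl_cons]
    by_cases hl : pvIsSep l = true
    · rcases eq_or_ne cur [] with h | h
      · subst h
        have : pvStep (blocks, []) l = (blocks, []) := by simp [pvStep, hl]
        rw [this, ih blocks [] (by simp)]
        simp [pvAltGo, hl]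
      · have : pvStep (blocks, cur) l = (blocks ++ [PySem.Str.join "\n" cur], []) := by
          simp [pvStep, hl, List.isEmpty_eq_false_iff.mpr h]
        rw [this, ih (blocks ++ [PySem.Str.join "\n" cur]) [] (by simp)]
        rw [pvAltGo_append_nonsep cur (l :: ls) h hns]
        simp [hl, pvAltGo]
    · have hl' : pvIsSep l = false := by simpa using hl
      have : pvStep (blocks, cur) l = (blocks, cur ++ [l]) := by simp [pvStep, hl']
      rw [this, ih blocks (cur ++ [l])
        (by intro x hx; rcases List.mem_append.mp hx with h | h
            · exact hns x h
            · simp only [List.mem_singleton] at h; subst h; exact hl')]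
      simp

-- ===== VERDICT (by name: the statement is the Claim_ definition above) =====
theorem split_into_blocks_py_spec : Claim_equal_split_into_blocks_py := by
  intro text _
  show split_into_blocks_py text = split_into_blocks_py_alt text
  rw [pvA_eq, split_into_blocks_py_alt, pvLoop_eq (pvLines text) [] [] (by simp)]
  simp
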